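-- pv_equiv track=rewrite | github.com/notrealyuti/reverseSSH | attacker.py | yutiCipher
-- ===== SOURCE A (Python) =====
-- def yutiCipher(data:str, mode:str):
--     lenght = len(data)
--     toShift = lenght
--     if toShift > 13:
--         toShift = 13
--
--     output = ""
--
--     if mode.lower() == "e":
--         for i in range(lenght):
--
--             output += chr( ord(data[i]) + toShift)
--
--     elif mode.lower() == "d":
--         for i in range(lenght):
--             output += chr( ord(data[i]) - toShift)
--     else:
--         return None
--
--     return output
-- ===== SOURCE B (Python) =====
-- def yutiCipher(data: str, mode: str):
--     toShift = min(len(data), 13)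
--     m = mode.lower()
--     if m == "e":
--         sign = 1
--     elif m == "d":
--         sign = -1
--     else:
--         return None
--     table = {ord(c): ord(c) + sign * toShift for c in set(data)}
--     return data.translate(table)
-- ===== Notes on version B (the rewrite author's own statement) =====
-- stated objective: idiomatic
-- what changed: Replaces the explicit per-index ord/chr append loop with computing a translation table (dict over the distinct characters) once and applying it in a single translate pass.
import Mathlib
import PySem

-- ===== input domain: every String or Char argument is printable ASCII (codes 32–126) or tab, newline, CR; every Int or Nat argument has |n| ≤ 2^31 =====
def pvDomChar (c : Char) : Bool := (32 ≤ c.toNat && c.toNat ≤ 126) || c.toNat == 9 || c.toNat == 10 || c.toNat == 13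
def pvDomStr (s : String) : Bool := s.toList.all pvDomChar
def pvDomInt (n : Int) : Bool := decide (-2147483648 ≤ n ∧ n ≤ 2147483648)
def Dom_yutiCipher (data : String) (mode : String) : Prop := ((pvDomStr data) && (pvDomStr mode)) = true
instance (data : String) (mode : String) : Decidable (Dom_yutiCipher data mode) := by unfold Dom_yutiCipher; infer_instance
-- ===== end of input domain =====

-- B replaces A's per-character ord/chr shift loop by one precomputed translation
-- table over the distinct characters, applied in a single translate pass (objective: idiomatic).

-- chr(n): exact for 0 ≤ n < 0xD800 (all codepoints reachable here: ASCII ± 13); none = ValueError for n < 0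
def pvChr? (n : Int) : Option Char :=
  if 0 ≤ n then some (Char.ofNat n.toNat) else none

-- ===== PORT A =====
def yutiCipher (data : String) (mode : String) : Option String :=
  let lenght : Int := PySem.Str.len data
  let toShift : Int := if lenght > 13 then 13 else lenght
  if PySem.Str.lower mode = "e" then
    ((PySem.List.pyRange 0 lenght 1).foldl
      (fun acc i =>
        acc.bind (fun out =>
          (pvChr? (((PySem.List.pyGetD data.toList i 'a').toNat : Int) + toShift)).map
            (fun ch => out ++ [ch])))
      (some [])).map String.ofList
  else if PySem.Str.lower mode = "d" then
    ((PySem.List.pyRange 0 lenght 1).foldl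
      (fun acc i =>
        acc.bind (fun out =>
          (pvChr? (((PySem.List.pyGetD data.toList i 'a').toNat : Int) - toShift)).map
            (fun ch => out ++ [ch])))
      (some [])).map String.ofList
  else none

-- ===== PORT B =====
-- data.translate(table): missing key keeps the char, int value n becomes chr(n) (none = ValueError)
def pvTranslate (table : PySem.Dict Nat Int) : List Char → Option (List Char)
  | [] => some []
  | c :: rest =>
    match table.get? c.toNat with
    | some n => (pvChr? n).bind (fun ch => (pvTranslate table rest).map (fun tl => ch :: tl))
    | none => (pvTranslate table rest).map (fun tl => c :: tl)

def yutiCipher_alt (data : String) (mode : String) : Option String :=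
  let toShift : Int := min (PySem.Str.len data) 13
  let m := PySem.Str.lower mode
  if m = "e" ∨ m = "d" then
    let sign : Int := if m = "e" then 1 else -1
    let table : PySem.Dict Nat Int :=
      (PySem.Set.ofList data.toList).foldl
        (fun d c => d.insert c.toNat ((c.toNat : Int) + sign * toShift)) PySem.Dict.empty
    (pvTranslate table data.toList).map String.ofList
  else none

-- ===== PRECONDITION & SPEC =====
-- Pre_ excludes exactly the inputs where A raises ValueError in chr(): decode mode with a
-- character whose code is below the shift amount (only tab/newline/CR can be); B raises there too.
def Pre_yutiCipher (data : String) (mode : String) : Prop :=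
  PySem.Str.lower mode = "d" →
    (data.toList.all (fun c => decide (min data.toList.length 13 ≤ c.toNat))) = true
instance (data : String) (mode : String) : Decidable (Pre_yutiCipher data mode) := by
  unfold Pre_yutiCipher; infer_instance
def pvWitness_yutiCipher : String × String := ("hi", "d")

def Spec_yutiCipher (data : String) (mode : String) (out : Option String) : Prop := out = yutiCipher_alt data mode
instance (data : String) (mode : String) (out : Option String) : Decidable (Spec_yutiCipher data mode out) := by unfold Spec_yutiCipher; infer_instance

-- ===== CLAIM (what is proved, stated in full; the proofs are below) =====
def Claim_equal_yutiCipher : Prop := ∀ (data : String) (mode : String), Dom_yutiCipher data mode → Pre_yutiCipher data mode → Spec_yutiCipher data mode (yutiCipher data mode)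

-- ===== LEMMAS AND PROOFS =====

theorem pv_char_toNat_inj {a b : Char} (h : a.toNat = b.toNat) : a = b := by
  apply Char.ext
  exact UInt32.toNat_inj.mp h

theorem pv_get_foldl_not_mem (v : Char → Int) (s : List Char) (c : Char) (hm : c ∉ s)
    (d : PySem.Dict Nat Int) :
    (s.foldl (fun d c => d.insert c.toNat (v c)) d).get? c.toNat = d.get? c.toNat := by
  induction s generalizing d with
  | nil => simp
  | cons y t iht =>
    simp only [List.mem_cons, not_or] at hm
    simp only [List.foldl_cons]
    rw [iht hm.2]
    exact PySem.Dict.get?_insert_of_ne _ _ (fun hh => hm.1 (pv_char_toNat_inj hh))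

theorem pv_get_foldl_mem (v : Char → Int) (s : List Char) (c : Char) (hc : c ∈ s)
    (d : PySem.Dict Nat Int) :
    (s.foldl (fun d c => d.insert c.toNat (v c)) d).get? c.toNat = some (v c) := by
  induction s generalizing d with
  | nil => cases hc
  | cons x rest ih =>
    simp only [List.foldl_cons]
    by_cases hm : c ∈ rest
    · exact ih hm _
    · have hx : c = x := by
        rcases List.mem_cons.mp hc with h | h
        · exact h
        · exact absurd h hm
      subst hx
      rw [pv_get_foldl_not_mem v rest c hm]
      exact PySem.Dict.get?_insert_self _ _ _

-- the table built by B maps every character of the source to its shifted code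
theorem pv_table_get (l : List Char) (v : Char → Int) (c : Char) (hc : c ∈ l) (d : PySem.Dict Nat Int) :
    ((PySem.Set.ofList l).foldl (fun d c => d.insert c.toNat (v c)) d).get? c.toNat = some (v c) :=
  pv_get_foldl_mem v _ c (by simpa [PySem.Set.mem_ofList] using hc) d

-- translate over l is the plain shifted map when every char is in the table and every shift is ≥ 0
theorem pv_translate_map (table : PySem.Dict Nat Int) (f : Char → Int) (l : List Char)
    (ht : ∀ c ∈ l, table.get? c.toNat = some (f c)) (hnn : ∀ c ∈ l, 0 ≤ f c) :
    pvTranslate table l = some (l.map (fun c => Char.ofNat (f c).toNat)) := by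
  induction l with
  | nil => rfl
  | cons c rest ih =>
    have h1 := ht c (by simp)
    have h2 : pvChr? (f c) = some (Char.ofNat (f c).toNat) := by
      simp [pvChr?, hnn c (by simp)]
    simp only [pvTranslate, h1, h2, Option.bind_some,
      ih (fun x hx => ht x (by simp [hx])) (fun x hx => hnn x (by simp [hx])), Option.map_some]
    simp

-- A's option-threaded append loop is the same shifted map when every shift is ≥ 0
theorem pv_loop_map (t : Int) (l : List Char) (out : List Char)
    (hnn : ∀ c ∈ l, 0 ≤ (c.toNat : Int) + t) :
    l.foldl (fun acc c => acc.bind (fun o => (pvChr? ((c.toNat : Int) + t)).map (fun ch => o ++ [ch])))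
      (some out) = some (out ++ l.map (fun c => Char.ofNat ((c.toNat : Int) + t).toNat)) := by
  induction l generalizing out with
  | nil => simp
  | cons c rest ih =>
    have h2 : pvChr? ((c.toNat : Int) + t) = some (Char.ofNat ((c.toNat : Int) + t).toNat) := by
      simp [pvChr?, hnn c (by simp)]
    rw [List.foldl_cons]
    simp only [Option.bind_some, h2, Option.map_some]
    rw [ih _ (fun x hx => hnn x (by simp [hx]))]
    simp

-- ===== VERDICT (by name: the statement is the Claim_ definition above) =====
theorem yutiCipher_spec : Claim_equal_yutiCipher := by
  intro data mode _hdom hpre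
  unfold Spec_yutiCipher yutiCipher yutiCipher_alt
  have hshift : (if (PySem.Str.len data) > 13 then 13 else (PySem.Str.len data)) =
      min (PySem.Str.len data) 13 := by
    simp only [PySem.Str.len_eq]
    omega
  set sh : Int := min ((data.toList.length : Int)) 13 with hsh
  have hsh' : min (PySem.Str.len data) 13 = sh := by simp [hsh]
  by_cases he : PySem.Str.lower mode = "e"
  · -- encode
    rw [if_pos he, if_pos (Or.inl he), if_pos he, hshift, hsh']
    have hloop := PySem.List.foldl_pyRange_zero_pyGetD' data.toList 'a'
      (fun acc c => acc.bind (fun o => (pvChr? ((c.toNat : Int) + sh)).map (fun ch => o ++ [ch])))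
      (some [])
    simp only [PySem.Str.len_eq]
    rw [hloop, pv_loop_map sh data.toList []
      (fun c _ => by
        have h0 := Int.natCast_nonneg c.toNat
        have h1 : (0:Int) ≤ sh := by omega
        omega)]
    rw [pv_translate_map _ (fun c => (c.toNat : Int) + 1 * sh) data.toList
      (fun c hc => pv_table_get data.toList _ c hc _)
      (fun c hc => by
        show (0:Int) ≤ (c.toNat : Int) + 1 * sh
        have h0 := Int.natCast_nonneg c.toNat
        omega)]
    simp
  · by_cases hd : PySem.Str.lower mode = "d"
    · -- decode
      rw [if_neg he, if_pos hd, if_pos (Or.inr hd), if_neg he, hshift, hsh']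
      have hloop := PySem.List.foldl_pyRange_zero_pyGetD' data.toList 'a'
        (fun acc c => acc.bind (fun o => (pvChr? ((c.toNat : Int) - sh)).map (fun ch => o ++ [ch])))
        (some [])
      simp only [PySem.Str.len_eq]
      have hpre' := hpre hd
      simp only [List.all_eq_true, decide_eq_true_eq] at hpre'
      rw [hloop]
      have hA := pv_loop_map (-sh) data.toList []
        (fun c hc => by have := hpre' c hc; omega)
      simp only [← sub_eq_add_neg] at hA
      rw [hA]
      rw [pv_translate_map _ (fun c => (c.toNat : Int) + (-1) * sh) data.toList
        (fun c hc => pv_table_get data.toList _ c hc _)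
        (fun c hc => by
          show (0:Int) ≤ (c.toNat : Int) + (-1) * sh
          have := hpre' c hc
          omega)]
      simp only [Option.map_some]
      congr 2
      apply List.map_congr_left
      intro c _
      congr 1
      omega
    · rw [if_neg he, if_neg hd, if_neg (by simp [he, hd])]
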